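-- pv_equiv track=rewrite | github.com/ArthurLabaki/Materias_UFU | TC/Trabalho_1/mt.py | criar_fita
-- ===== SOURCE A (Python) =====
-- def criar_fita(cad, branco):
--     fita = branco
--     for i in cad:
--         fita = fita + [i]
--     fita = fita + branco
--     while 1:
--         if len(fita) < 10:
--             fita = fita + branco
--         else:
--             return fita
-- ===== SOURCE B (Python) =====
-- def criar_fita(cad, branco):
--     core = branco + list(cad) + branco
--     if len(core) >= 10:
--         return core
--     m = (10 - len(core) + len(branco) - 1) // len(branco)
--     return core + branco * m
-- ===== Notes on version B (the rewrite author's own statement) =====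
-- stated objective: faster
-- what changed: Replaces A's per-character append loop and repeated append-and-recheck while-loop by one concatenation plus a closed-form computation of the number of blank blocks to pad.
import Mathlib
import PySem

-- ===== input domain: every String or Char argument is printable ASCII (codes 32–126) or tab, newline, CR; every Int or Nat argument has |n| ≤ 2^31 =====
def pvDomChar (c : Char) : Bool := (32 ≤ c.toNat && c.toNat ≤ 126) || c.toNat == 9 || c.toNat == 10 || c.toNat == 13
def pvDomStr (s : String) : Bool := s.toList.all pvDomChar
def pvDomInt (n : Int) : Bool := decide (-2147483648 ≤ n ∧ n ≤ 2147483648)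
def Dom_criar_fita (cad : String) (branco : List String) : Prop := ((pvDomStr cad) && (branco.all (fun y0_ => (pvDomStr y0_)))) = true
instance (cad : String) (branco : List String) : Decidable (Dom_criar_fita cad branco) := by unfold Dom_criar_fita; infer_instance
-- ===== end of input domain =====

-- B computes the blank padding count in closed form instead of A's append-and-recheck loop (objective: faster — A rebuilds the list on every append).

-- ===== PORT A =====
-- the 'while 1' loop; 10 steps of fuel suffice on Pre_ (each step adds ≥ 1 element there);
-- the fuel only makes the same computation total, it is exhausted only where Python A diverges (outside Pre_)
def criar_fita_loop : Nat → List String → List String → List String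
  | 0, _, fita => fita
  | n + 1, branco, fita =>
      if fita.length < 10 then criar_fita_loop n branco (fita ++ branco) else fita

def criar_fita (cad : String) (branco : List String) : List String :=
  let fita := branco
  let fita := cad.toList.foldl (fun f i => f ++ [String.singleton i]) fita
  let fita := fita ++ branco
  criar_fita_loop 10 branco fita

-- ===== PORT B =====
def criar_fita_alt (cad : String) (branco : List String) : List String :=
  let core := branco ++ cad.toList.map String.singleton ++ branco
  if 10 ≤ core.length then core
  else
    let m := (10 - core.length + branco.length - 1) / branco.length
    core ++ (List.replicate m branco).flatten

-- ===== PRECONDITION & SPEC =====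
-- Pre_ excludes branco = [] with len(cad) < 10: there Python A loops forever (returns nothing) and B raises ZeroDivisionError.
def Pre_criar_fita (cad : String) (branco : List String) : Prop :=
  branco ≠ [] ∨ 10 ≤ cad.length

instance (cad : String) (branco : List String) : Decidable (Pre_criar_fita cad branco) := by
  unfold Pre_criar_fita; infer_instance

def pvWitness_criar_fita : String × List String := ("ab", ["_"])

def Spec_criar_fita (cad : String) (branco : List String) (out : List String) : Prop := out = criar_fita_alt cad branco
instance (cad : String) (branco : List String) (out : List String) : Decidable (Spec_criar_fita cad branco out) := by unfold Spec_criar_fita; infer_instance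

-- ===== CLAIM (what is proved, stated in full; the proofs are below) =====
def Claim_equal_criar_fita : Prop := ∀ (cad : String) (branco : List String), Dom_criar_fita cad branco → Pre_criar_fita cad branco → Spec_criar_fita cad branco (criar_fita cad branco)

-- ===== LEMMAS AND PROOFS =====

lemma criar_fita_foldl_append (l : List Char) :
    ∀ init : List String,
      l.foldl (fun f i => f ++ [String.singleton i]) init = init ++ l.map String.singleton := by
  induction l with
  | nil => intro init; simp
  | cons c t ih => intro init; simp [List.foldl, ih]

-- with branco nonempty and enough fuel, the loop appends exactly the closed-form number of blank blocks
lemma criar_fita_loop_eq (branco : List String) (hb : 1 ≤ branco.length) :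
    ∀ (n : Nat) (fita : List String), 10 ≤ fita.length + n * branco.length →
      criar_fita_loop n branco fita =
        fita ++ (List.replicate ((10 - fita.length + branco.length - 1) / branco.length) branco).flatten := by
  intro n
  induction n with
  | zero =>
      intro fita h
      simp only [Nat.zero_mul, Nat.add_zero] at h
      have : 10 - fita.length + branco.length - 1 = branco.length - 1 := by omega
      rw [criar_fita_loop, this, Nat.div_eq_of_lt (by omega)]
      simp
  | succ n ih =>
      intro fita h
      rw [criar_fita_loop]
      by_cases hlt : fita.length < 10
      · rw [if_pos hlt]
        have hlen : (fita ++ branco).length = fita.length + branco.length := by simp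
        have hmul : (n + 1) * branco.length = n * branco.length + branco.length := by ring
        have h' : 10 ≤ (fita ++ branco).length + n * branco.length := by
          rw [hlen]; omega
        rw [ih (fita ++ branco) h', hlen]
        by_cases h10 : 10 ≤ fita.length + branco.length
        · -- one more block is enough: old pad count is 1, new is 0
          have e1 : 10 - (fita.length + branco.length) + branco.length - 1 = branco.length - 1 := by omega
          have e2 : 10 - fita.length + branco.length - 1 =
              (10 - fita.length - 1) + branco.length := by omega
          rw [e1, Nat.div_eq_of_lt (by omega), e2, Nat.add_div_right _ (by omega),
              Nat.div_eq_of_lt (by omega)]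
          simp
        · -- still short: pad count drops by exactly one
          have e2 : 10 - fita.length + branco.length - 1 =
              (10 - (fita.length + branco.length) + branco.length - 1) + branco.length := by omega
          rw [e2, Nat.add_div_right _ (by omega), List.replicate_succ]
          simp
      · rw [if_neg hlt]
        have : 10 - fita.length + branco.length - 1 = branco.length - 1 := by omega
        rw [this, Nat.div_eq_of_lt (by omega)]
        simp

lemma criar_fita_loop_done (n : Nat) (branco fita : List String) (h : 10 ≤ fita.length) :
    criar_fita_loop n branco fita = fita := by
  cases n with
  | zero => rfl
  | succ n => rw [criar_fita_loop, if_neg (by omega)]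

-- ===== VERDICT (by name: the statement is the Claim_ definition above) =====
theorem criar_fita_spec : Claim_equal_criar_fita := by
  intro cad branco _ hpre
  unfold Spec_criar_fita criar_fita criar_fita_alt
  simp only [criar_fita_foldl_append]
  set core := branco ++ cad.toList.map String.singleton ++ branco with hcore
  have hclen : core.length = branco.length + cad.length + branco.length := by
    simp only [hcore, List.length_append, List.length_map, String.length_toList]
  by_cases h10 : 10 ≤ core.length
  · rw [if_pos h10, criar_fita_loop_done _ _ _ h10]
  · rw [if_neg h10]
    have hb : 1 ≤ branco.length := by
      rcases hpre with hne | hlen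
      · exact List.length_pos_iff.mpr hne
      · exfalso; omega
    exact criar_fita_loop_eq branco hb 10 core (by omega)
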